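-- pv_equiv track=rewrite | github.com/kippig/Python_Practice | src/Cracking_the_coding_interview/Chapter_8_Dynamic_and_Recursion/8.3.py | find_index2
-- ===== SOURCE A (Python) =====
-- def find_index2(arr, base=0):
--     """
--     Space: 1
--     Time: O(log n)
--     """
--     if len(arr) == 0:
--         return None
--     i = len(arr)//2
--     if arr[i] < base + i:
--         return find_index2(arr[i+1:], base + i + 1)
--     elif arr[i] > base + i:
--         return find_index2(arr[:i], base)
--     else:
--         return base + i
-- ===== SOURCE B (Python) =====
-- def find_index2(arr, base=0):
--     lo, hi = 0, len(arr)
--     while lo < hi: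
--         mid = (lo + hi) // 2
--         v = arr[mid]
--         if v < base + mid:
--             lo = mid + 1
--         elif v > base + mid:
--             hi = mid
--         else:
--             return base + mid
--     return None
-- ===== Notes on version B (the rewrite author's own statement) =====
-- stated objective: alternative
-- what changed: Replaced the recursive search that copies list slices (arr[i+1:], arr[:i]) at every step with an iterative lo/hi binary search over indices that never copies the list; measured speed gain was below 1.5x, so no speed is claimed.
import Mathlib
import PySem

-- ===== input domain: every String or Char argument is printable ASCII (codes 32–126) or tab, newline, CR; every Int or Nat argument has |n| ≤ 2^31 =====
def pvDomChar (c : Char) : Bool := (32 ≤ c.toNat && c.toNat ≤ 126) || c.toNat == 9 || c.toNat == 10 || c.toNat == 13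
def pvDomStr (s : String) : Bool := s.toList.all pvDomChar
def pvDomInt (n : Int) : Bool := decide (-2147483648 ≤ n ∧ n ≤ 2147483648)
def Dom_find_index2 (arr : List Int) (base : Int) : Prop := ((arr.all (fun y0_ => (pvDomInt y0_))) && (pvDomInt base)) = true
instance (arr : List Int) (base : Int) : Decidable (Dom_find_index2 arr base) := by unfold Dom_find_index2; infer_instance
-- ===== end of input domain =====

-- B replaces A's recursion on list slices (which copies arr[i+1:] / arr[:i] each step)
-- by an iterative lo/hi binary search over indices (no copying); return values are identical.

-- ===== PORT A =====
-- Literal port of A: recursion on slices. i = len(arr)//2 is Nat division, exact since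
-- the length is nonnegative; arr[i] is always in range here, so pyGet?'s none branch is dead.
def find_index2 (arr : List Int) (base : Int) : Option Int :=
  if arr.length = 0 then none
  else
    let i : Nat := arr.length / 2
    match PySem.List.pyGet? arr (i : Int) with
    | none => none  -- unreachable: i < arr.length
    | some v =>
      if v < base + (i : Int) then
        find_index2 (PySem.List.slice arr (some ((i + 1 : Nat) : Int)) none) (base + (i : Int) + 1)
      else if v > base + (i : Int) then
        find_index2 (PySem.List.slice arr none (some ((i : Nat) : Int))) base
      else
        some (base + (i : Int))
termination_by arr.length
decreasing_by
  · rw [PySem.List.slice_from_natCast]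
    simp only [List.length_drop]
    omega
  · rw [PySem.List.slice_to_natCast]
    simp only [List.length_take]
    omega

-- ===== PORT B =====
-- the while-loop of Source B; arr[mid] is always in range when called from find_index2_alt
def find_index2_loop (arr : List Int) (base : Int) (lo hi : Nat) : Option Int :=
  if lo < hi then
    let mid : Nat := (lo + hi) / 2
    let v : Int := arr.getD mid 0
    if v < base + (mid : Int) then
      find_index2_loop arr base (mid + 1) hi
    else if v > base + (mid : Int) then
      find_index2_loop arr base lo mid
    else
      some (base + (mid : Int))
  else none
termination_by hi - lo
decreasing_by all_goals omega

def find_index2_alt (arr : List Int) (base : Int) : Option Int :=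
  find_index2_loop arr base 0 arr.length

-- ===== PRECONDITION & SPEC =====
def Spec_find_index2 (arr : List Int) (base : Int) (out : Option Int) : Prop := out = find_index2_alt arr base
instance (arr : List Int) (base : Int) (out : Option Int) : Decidable (Spec_find_index2 arr base out) := by unfold Spec_find_index2; infer_instance

-- ===== CLAIM (what is proved, stated in full; the proofs are below) =====
def Claim_equal_find_index2 : Prop := ∀ (arr : List Int) (base : Int), Dom_find_index2 arr base → Spec_find_index2 arr base (find_index2 arr base)

-- ===== LEMMAS AND PROOFS =====

-- The loop of B on window [lo, hi) computes what A computes on the slice arr[lo:hi]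
-- with the base shifted by lo.
theorem find_index2_loop_eq (arr : List Int) (n : Nat) :
    ∀ lo hi base, hi - lo = n → lo ≤ hi → hi ≤ arr.length →
      find_index2_loop arr base lo hi
        = find_index2 ((arr.drop lo).take (hi - lo)) (base + (lo : Int)) := by
  induction n using Nat.strong_induction_on with
  | _ n ih =>
    intro lo hi base hn hlh hhl
    rw [find_index2_loop, find_index2]
    have hsublen : ((arr.drop lo).take (hi - lo)).length = hi - lo := by
      simp [List.length_take, List.length_drop]; omega
    by_cases h : lo < hi
    · simp only [h, if_true]
      have hlen0 : ¬ ((arr.drop lo).take (hi - lo)).length = 0 := by omega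
      simp only [hlen0, if_false]
      set i : Nat := ((arr.drop lo).take (hi - lo)).length / 2 with hi_def
      have hmid : (lo + hi) / 2 = lo + i := by omega
      have hiltn : i < hi - lo := by omega
      have hmidlt : lo + i < arr.length := by omega
      have hget : PySem.List.pyGet? ((arr.drop lo).take (hi - lo)) (i : Int)
          = some (arr[lo + i]'hmidlt) := by
        rw [PySem.List.pyGet?_natCast]
        rw [List.getElem?_take_of_lt hiltn, List.getElem?_drop]
        simp [hmidlt]
      rw [hget]
      have hv : arr.getD (lo + i) 0 = arr[lo + i]'hmidlt := by
        simp [List.getD, hmidlt]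
      have hcast : base + ((lo + i : Nat) : Int) = base + (lo : Int) + (i : Int) := by
        push_cast; ring
      rw [hmid, hv, hcast]
      by_cases h1 : arr[lo + i]'hmidlt < base + (lo : Int) + (i : Int)
      · simp only [h1, if_true]
        rw [PySem.List.slice_from_natCast, List.drop_take, List.drop_drop]
        rw [ih (hi - (lo + i + 1)) (by omega) (lo + i + 1) hi base rfl (by omega) hhl]
        have e1 : lo + (i + 1) = lo + i + 1 := by omega
        have e2 : hi - lo - (i + 1) = hi - (lo + i + 1) := by omega
        have e3 : base + ((lo + i + 1 : Nat) : Int) = base + (lo : Int) + (i : Int) + 1 := by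
          push_cast; ring
        rw [e1, e2, e3]
      · simp only [h1, if_false]
        by_cases h2 : arr[lo + i]'hmidlt > base + (lo : Int) + (i : Int)
        · simp only [h2, if_true]
          rw [PySem.List.slice_to_natCast, List.take_take]
          rw [ih (lo + i - lo) (by omega) lo (lo + i) base rfl (by omega) (by omega)]
          have e4 : min i (hi - lo) = i := by omega
          have e5 : lo + i - lo = i := by omega
          rw [e4, e5]
        · simp only [h2, if_false]
    · simp only [h, if_false]
      have : hi - lo = 0 := by omega
      simp [this]

theorem find_index2_eq_alt (arr : List Int) (base : Int) :
    find_index2 arr base = find_index2_alt arr base := by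
  rw [find_index2_alt,
    find_index2_loop_eq arr arr.length 0 arr.length base (by omega) (by omega) (le_refl _)]
  simp

-- ===== VERDICT (by name: the statement is the Claim_ definition above) =====
theorem find_index2_spec : Claim_equal_find_index2 := by
  intro arr base _
  unfold Spec_find_index2
  exact find_index2_eq_alt arr base
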